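-- pv_equiv track=rewrite | github.com/AlexJumaW99/AguaLink-Solutions-Dashboard | utils/add_wpg_to_geojson.py | detect_property_schema
-- ===== SOURCE A (Python) =====
-- def detect_property_schema(features):
--     # Expect keys like: MUNI_NAME, MUNI_STATU, population_2021, name, status
--     # We'll mirror what the file already uses; fall back if missing.
--     keys = set()
--     for f in features:
--         keys.update(f.get("properties", {}).keys())
--     # Required (from your example file)
--     prop_keys = {
--         "MUNI_NAME": "MUNI_NAME" if "MUNI_NAME" in keys else None,
--         "MUNI_STATU": "MUNI_STATU" if "MUNI_STATU" in keys else None,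
--         "population_2021": "population_2021" if "population_2021" in keys else None,
--         "name": "name" if "name" in keys else None,
--         "status": "status" if "status" in keys else None,
--     }
--     return prop_keys
-- ===== SOURCE B (Python) =====
-- def detect_property_schema(features):
--     # Per-key scan: for each of the 5 target keys, check whether any feature's
--     # properties dict contains it (no accumulated key set).
--     return {
--         k: (k if any(k in f.get("properties", {}).keys() for f in features) else None)
--         for k in ["MUNI_NAME", "MUNI_STATU", "population_2021", "name", "status"]
--     }
-- ===== Notes on version B (the rewrite author's own statement) =====
-- stated objective: alternative
-- what changed: Instead of accumulating all property keys of all features into one set and then testing the 5 targets against it, B iterates over the fixed 5 target keys and for each does an any-scan over the features' properties; no key set is ever built.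
import Mathlib
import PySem

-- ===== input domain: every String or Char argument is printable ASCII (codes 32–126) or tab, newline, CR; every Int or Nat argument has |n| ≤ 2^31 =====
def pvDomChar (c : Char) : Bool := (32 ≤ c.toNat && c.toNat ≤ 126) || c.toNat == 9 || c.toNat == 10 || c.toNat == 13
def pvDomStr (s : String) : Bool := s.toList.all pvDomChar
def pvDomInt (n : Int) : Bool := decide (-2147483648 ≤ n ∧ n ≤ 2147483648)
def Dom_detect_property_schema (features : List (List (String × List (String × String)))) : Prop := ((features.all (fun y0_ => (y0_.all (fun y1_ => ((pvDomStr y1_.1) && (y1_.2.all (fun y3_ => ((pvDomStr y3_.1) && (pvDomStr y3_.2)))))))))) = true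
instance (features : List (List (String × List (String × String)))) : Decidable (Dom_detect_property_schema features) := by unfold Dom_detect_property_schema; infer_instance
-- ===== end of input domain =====

-- B iterates over the 5 target keys and any-scans the features per key, instead of
-- A's accumulation of every property key into one set first (objective: alternative).

-- shared accessor for the Python expression `f.get("properties", {}).keys()`
def pvPropKeys (f : List (String × List (String × String))) : List String :=
  (PySem.Dict.mk (PySem.Dict.getD (PySem.Dict.mk f) "properties" [])).keys

-- ===== PORT A =====
def detect_property_schema (features : List (List (String × List (String × String)))) : List (String × Option String) :=
  let keys : PySem.Set String :=
    features.foldl (fun s f => PySem.Set.update s (pvPropKeys f)) PySem.Set.empty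
  [ ("MUNI_NAME", if keys.contains "MUNI_NAME" then some "MUNI_NAME" else none),
    ("MUNI_STATU", if keys.contains "MUNI_STATU" then some "MUNI_STATU" else none),
    ("population_2021", if keys.contains "population_2021" then some "population_2021" else none),
    ("name", if keys.contains "name" then some "name" else none),
    ("status", if keys.contains "status" then some "status" else none) ]

-- ===== PORT B =====
def detect_property_schema_alt (features : List (List (String × List (String × String)))) : List (String × Option String) :=
  ["MUNI_NAME", "MUNI_STATU", "population_2021", "name", "status"].map (fun k =>
    (k, if features.any (fun f => (pvPropKeys f).contains k) then some k else none))

-- ===== PRECONDITION & SPEC =====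
def Spec_detect_property_schema (features : List (List (String × List (String × String)))) (out : List (String × Option String)) : Prop := out = detect_property_schema_alt features
instance (features : List (List (String × List (String × String)))) (out : List (String × Option String)) : Decidable (Spec_detect_property_schema features out) := by unfold Spec_detect_property_schema; infer_instance

-- ===== CLAIM (what is proved, stated in full; the proofs are below) =====
def Claim_equal_detect_property_schema : Prop := ∀ (features : List (List (String × List (String × String)))), Dom_detect_property_schema features → Spec_detect_property_schema features (detect_property_schema features)

-- ===== LEMMAS AND PROOFS =====

theorem pv_mem_foldl_update {α β : Type} [BEq α] [LawfulBEq α] (g : β → List α)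
    (l : List β) (s : PySem.Set α) (k : α) :
    k ∈ l.foldl (fun s f => PySem.Set.update s (g f)) s ↔ k ∈ s ∨ ∃ f ∈ l, k ∈ g f := by
  induction l generalizing s with
  | nil => simp [List.foldl]
  | cons f t ih =>
    simp only [List.foldl_cons, ih, PySem.Set.mem_update, List.mem_cons]
    constructor
    · rintro (( h | h ) | ⟨f', hf', hk⟩)
      · exact Or.inl h
      · exact Or.inr ⟨f, Or.inl rfl, h⟩
      · exact Or.inr ⟨f', Or.inr hf', hk⟩
    · rintro ( h | ⟨f', ( rfl | hf' ), hk⟩)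
      · exact Or.inl (Or.inl h)
      · exact Or.inl (Or.inr hk)
      · exact Or.inr ⟨f', hf', hk⟩

theorem pv_contains_acc (features : List (List (String × List (String × String)))) (k : String) :
    (features.foldl (fun s f => PySem.Set.update s (pvPropKeys f)) PySem.Set.empty).contains k
      = features.any (fun f => (pvPropKeys f).contains k) := by
  rw [Bool.eq_iff_iff]
  simp [pv_mem_foldl_update, PySem.Set.empty, List.any_eq_true]

-- ===== VERDICT (by name: the statement is the Claim_ definition above) =====
theorem detect_property_schema_spec : Claim_equal_detect_property_schema := by
  intro features _
  unfold Spec_detect_property_schema detect_property_schema detect_property_schema_alt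
  simp only [pv_contains_acc, List.map]
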